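-- pv_equiv track=rewrite | github.com/athola/importobot | src/importobot/security/credential_patterns.py | _looks_like_placeholder
-- ===== SOURCE A (Python) =====
-- def _looks_like_placeholder(match_text: str) -> bool:
--     """Return True when the matched text resembles placeholder content."""
--     text = match_text.lower()
--     placeholder_tokens = (
--         "example_",
--         "example-",
--         "example ",
--         "sample_",
--         "sample-",
--         "sample ",
--         "fake_",
--         "fake-",
--         "fake ",
--         "dummy_",
--         "dummy-",
--         "dummy ",
--         "test_",
--         "test-",
--         "test ",
--         "demo ",
--         "demo_",
--         "demo-",
--         "placeholder",
--         "your_",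
--         "your-",
--         "your ",
--         "replace_with",
--         "replace_with_actual",
--         "placeholder_key",
--         "placeholder_key_value",
--         "use_env_variable_for",
--     )
--     return any(token in text for token in placeholder_tokens)
-- ===== SOURCE B (Python) =====
-- def _looks_like_placeholder(match_text: str) -> bool:
--     """Return True when the matched text resembles placeholder content."""
--     text = match_text.lower()
--     literals = ("placeholder", "replace_with", "use_env_variable_for")
--     stems = ("example", "sample", "fake", "dummy", "test", "demo", "your")
--     for i in range(len(text)):
--         suffix = text[i:]
--         if any(suffix.startswith(lit) for lit in literals):
--             return True
--         if any(
--             suffix.startswith(stem)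
--             and len(suffix) > len(stem)
--             and suffix[len(stem)] in "_- "
--             for stem in stems
--         ):
--             return True
--     return False
-- ===== Notes on version B (the rewrite author's own statement) =====
-- stated objective: alternative
-- what changed: Instead of 27 independent substring searches over the lowered text, B makes one left-to-right pass over the suffixes, checking at each position 3 literal prefixes and 7 stems followed by a separator character (A's redundant longer tokens are absorbed by their prefixes).
import Mathlib
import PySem

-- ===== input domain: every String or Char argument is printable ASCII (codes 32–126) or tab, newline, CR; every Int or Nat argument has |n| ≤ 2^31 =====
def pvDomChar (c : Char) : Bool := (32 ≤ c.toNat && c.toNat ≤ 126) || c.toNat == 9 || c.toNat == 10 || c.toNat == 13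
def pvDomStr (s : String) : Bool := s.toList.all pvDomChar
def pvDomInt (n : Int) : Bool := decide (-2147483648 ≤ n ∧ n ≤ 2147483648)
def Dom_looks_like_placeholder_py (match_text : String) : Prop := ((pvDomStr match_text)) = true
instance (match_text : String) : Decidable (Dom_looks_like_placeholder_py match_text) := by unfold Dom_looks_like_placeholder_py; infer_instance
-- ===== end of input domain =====

-- B replaces A's 27 independent substring searches by one left-to-right scan that, at each
-- suffix, checks 3 literal prefixes and 7 stems followed by a separator char (objective: alternative; one pass, fewer patterns).


-- ===== PORT A =====
def pvTokens : List String :=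
  ["example_", "example-", "example ",
   "sample_", "sample-", "sample ",
   "fake_", "fake-", "fake ",
   "dummy_", "dummy-", "dummy ",
   "test_", "test-", "test ",
   "demo ", "demo_", "demo-",
   "placeholder",
   "your_", "your-", "your ",
   "replace_with", "replace_with_actual",
   "placeholder_key", "placeholder_key_value",
   "use_env_variable_for"]

def looks_like_placeholder_py (match_text : String) : Bool :=
  let text := PySem.Str.lower match_text
  pvTokens.any (fun token => PySem.Str.isIn token text)

-- ===== PORT B =====
def pvLiterals : List (List Char) :=
  ["placeholder".toList, "replace_with".toList, "use_env_variable_for".toList]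

def pvStems : List (List Char) :=
  ["example".toList, "sample".toList, "fake".toList, "dummy".toList,
   "test".toList, "demo".toList, "your".toList]

def pvSeps : List Char := "_- ".toList

-- one loop iteration of Source B: does any pattern match at the START of this suffix?
def pvHit (suffix : List Char) : Bool :=
  pvLiterals.any (fun lit => PySem.Chars.startswith suffix lit) ||
  pvStems.any (fun stem =>
    PySem.Chars.startswith suffix stem &&
    match suffix[stem.length]? with
    | some c => pvSeps.contains c
    | none => false)

-- Source B's 'for i in range(len(text)): suffix = text[i:] …' as structural recursion on suffixes
def pvScan : List Char → Bool
  | [] => false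
  | c :: rest => pvHit (c :: rest) || pvScan rest

def looks_like_placeholder_py_alt (match_text : String) : Bool :=
  pvScan (PySem.Chars.lower match_text.toList)

-- ===== PRECONDITION & SPEC =====
def Spec_looks_like_placeholder_py (match_text : String) (out : Bool) : Prop := out = looks_like_placeholder_py_alt match_text
instance (match_text : String) (out : Bool) : Decidable (Spec_looks_like_placeholder_py match_text out) := by unfold Spec_looks_like_placeholder_py; infer_instance

-- ===== CLAIM (what is proved, stated in full; the proofs are below) =====
def Claim_equal_looks_like_placeholder_py : Prop := ∀ (match_text : String), Dom_looks_like_placeholder_py match_text → Spec_looks_like_placeholder_py match_text (looks_like_placeholder_py match_text)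

-- ===== LEMMAS AND PROOFS =====

-- appending one element to a prefix pattern = prefix plus a check of the next character
theorem pv_prefix_snoc_iff (xs : List Char) (c : Char) (s : List Char) :
    (xs ++ [c]) <+: s ↔ xs <+: s ∧ s[xs.length]? = some c := by
  constructor
  · rintro ⟨t, ht⟩
    subst ht
    refine ⟨⟨[c] ++ t, by simp⟩, ?_⟩
    simp
  · rintro ⟨⟨t, ht⟩, hget⟩
    subst ht
    rw [List.getElem?_append_right (le_refl _)] at hget
    simp at hget
    cases t with
    | nil => simp at hget
    | cons d t' =>
      simp at hget
      subst hget
      exact ⟨t', by simp⟩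

theorem pvHit_iff (cs : List Char) :
    pvHit cs = true ↔ ∃ tok ∈ pvTokens, tok.toList <+: cs := by
  constructor
  · intro h
    simp only [pvHit, Bool.or_eq_true, List.any_eq_true, Bool.and_eq_true] at h
    rcases h with ⟨lit, hmem, hsw⟩ | ⟨st, hmem, hsw, hsep⟩
    · have hp : lit <+: cs := (PySem.Chars.startswith_iff _ _).mp hsw
      fin_cases hmem
      · exact ⟨"placeholder", by decide, hp⟩
      · exact ⟨"replace_with", by decide, hp⟩
      · exact ⟨"use_env_variable_for", by decide, hp⟩
    · cases hg : cs[st.length]? with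
      | none => rw [hg] at hsep; simp at hsep
      | some c =>
        rw [hg] at hsep
        have hc : c ∈ pvSeps := by simpa using hsep
        have hp : (st ++ [c]) <+: cs :=
          (pv_prefix_snoc_iff st c cs).mpr ⟨(PySem.Chars.startswith_iff _ _).mp hsw, hg⟩
        have hmemtok : ∃ tok ∈ pvTokens, tok.toList = st ++ [c] := by
          fin_cases hmem <;> fin_cases hc <;> decide
        obtain ⟨tok, htm, heq⟩ := hmemtok
        exact ⟨tok, htm, heq ▸ hp⟩
  · rintro ⟨tok, hmem, hp⟩
    have hlit : ∀ lit ∈ pvLiterals, lit <+: cs → pvHit cs = true := by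
      intro lit hm hpre
      simp only [pvHit, Bool.or_eq_true, List.any_eq_true]
      exact Or.inl ⟨lit, hm, (PySem.Chars.startswith_iff _ _).mpr hpre⟩
    have hstem : ∀ st ∈ pvStems, ∀ c ∈ pvSeps, (st ++ [c]) <+: cs → pvHit cs = true := by
      intro st hm c hcm hpre
      obtain ⟨h1, h2⟩ := (pv_prefix_snoc_iff st c cs).mp hpre
      simp only [pvHit, Bool.or_eq_true, List.any_eq_true, Bool.and_eq_true]
      refine Or.inr ⟨st, hm, (PySem.Chars.startswith_iff _ _).mpr h1, ?_⟩
      rw [h2]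
      simpa using hcm
    fin_cases hmem
    · exact hstem "example".toList (by decide) '_' (by decide) hp
    · exact hstem "example".toList (by decide) '-' (by decide) hp
    · exact hstem "example".toList (by decide) ' ' (by decide) hp
    · exact hstem "sample".toList (by decide) '_' (by decide) hp
    · exact hstem "sample".toList (by decide) '-' (by decide) hp
    · exact hstem "sample".toList (by decide) ' ' (by decide) hp
    · exact hstem "fake".toList (by decide) '_' (by decide) hp
    · exact hstem "fake".toList (by decide) '-' (by decide) hp
    · exact hstem "fake".toList (by decide) ' ' (by decide) hp
    · exact hstem "dummy".toList (by decide) '_' (by decide) hp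
    · exact hstem "dummy".toList (by decide) '-' (by decide) hp
    · exact hstem "dummy".toList (by decide) ' ' (by decide) hp
    · exact hstem "test".toList (by decide) '_' (by decide) hp
    · exact hstem "test".toList (by decide) '-' (by decide) hp
    · exact hstem "test".toList (by decide) ' ' (by decide) hp
    · exact hstem "demo".toList (by decide) ' ' (by decide) hp
    · exact hstem "demo".toList (by decide) '_' (by decide) hp
    · exact hstem "demo".toList (by decide) '-' (by decide) hp
    · exact hlit "placeholder".toList (by decide) (List.IsPrefix.trans (by decide) hp)
    · exact hstem "your".toList (by decide) '_' (by decide) hp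
    · exact hstem "your".toList (by decide) '-' (by decide) hp
    · exact hstem "your".toList (by decide) ' ' (by decide) hp
    · exact hlit "replace_with".toList (by decide) (List.IsPrefix.trans (by decide) hp)
    · exact hlit "replace_with".toList (by decide) (List.IsPrefix.trans (by decide) hp)
    · exact hlit "placeholder".toList (by decide) (List.IsPrefix.trans (by decide) hp)
    · exact hlit "placeholder".toList (by decide) (List.IsPrefix.trans (by decide) hp)
    · exact hlit "use_env_variable_for".toList (by decide) (List.IsPrefix.trans (by decide) hp)

theorem pvScan_iff (cs : List Char) :
    pvScan cs = true ↔ ∃ j, pvHit (cs.drop j) = true := by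
  induction cs with
  | nil =>
    simp only [pvScan, List.drop_nil]
    constructor
    · intro h; exact absurd h (by decide)
    · rintro ⟨j, hj⟩; exact absurd hj (by decide)
  | cons c rest ih =>
    simp only [pvScan, Bool.or_eq_true, ih]
    constructor
    · rintro (h | ⟨j, hj⟩)
      · exact ⟨0, h⟩
      · exact ⟨j + 1, by simpa using hj⟩
    · rintro ⟨j, hj⟩
      cases j with
      | zero => exact Or.inl (by simpa using hj)
      | succ j' => exact Or.inr ⟨j', by simpa using hj⟩

-- ===== VERDICT (by name: the statement is the Claim_ definition above) =====
theorem looks_like_placeholder_py_spec : Claim_equal_looks_like_placeholder_py := by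
  intro s _
  unfold Spec_looks_like_placeholder_py looks_like_placeholder_py looks_like_placeholder_py_alt
  rw [Bool.eq_iff_iff]
  simp only [List.any_eq_true]
  constructor
  · rintro ⟨tok, hmem, hin⟩
    have hin' : PySem.Chars.isIn tok.toList (PySem.Chars.lower s.toList) = true := by
      simpa using hin
    obtain ⟨j, hj⟩ := (PySem.Chars.exists_prefix_drop_iff_isIn _ _).mpr hin'
    exact (pvScan_iff _).mpr ⟨j, (pvHit_iff _).mpr ⟨tok, hmem, hj⟩⟩
  · intro h
    obtain ⟨j, hj⟩ := (pvScan_iff _).mp h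
    obtain ⟨tok, hmem, hp⟩ := (pvHit_iff _).mp hj
    refine ⟨tok, hmem, ?_⟩
    have : PySem.Chars.isIn tok.toList (PySem.Chars.lower s.toList) = true :=
      (PySem.Chars.exists_prefix_drop_iff_isIn _ _).mp ⟨j, hp⟩
    simpa using this
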